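-- pv_equiv track=rewrite | github.com/andromedagalax/Movie_Bot | plugins/Extra/fun.py | aesthetify
-- ===== SOURCE A (Python) =====
-- def aesthetify(string):
--     PRINTABLE_ASCII = range(0x21, 0x7f)
--     for c in string:
--         c = ord(c)
--         if c in PRINTABLE_ASCII:
--             c += 0xFF00 - 0x20
--         elif c == ord(" "):
--             c = 0x3000
--         yield chr(c)
-- ===== SOURCE B (Python) =====
-- def aesthetify(string):
--     table = {0x20: 0x3000}
--     for o in range(0x21, 0x7f):
--         table[o] = o + 0xFF00 - 0x20
--     yield from string.translate(table)
-- ===== Notes on version B (the rewrite author's own statement) =====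
-- stated objective: idiomatic
-- what changed: The per-character ord/branch/chr arithmetic is precomputed once into a translation table (dict ordinal->ordinal) and applied via str.translate, with unmapped characters passing through; no per-character branching remains.
import Mathlib
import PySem

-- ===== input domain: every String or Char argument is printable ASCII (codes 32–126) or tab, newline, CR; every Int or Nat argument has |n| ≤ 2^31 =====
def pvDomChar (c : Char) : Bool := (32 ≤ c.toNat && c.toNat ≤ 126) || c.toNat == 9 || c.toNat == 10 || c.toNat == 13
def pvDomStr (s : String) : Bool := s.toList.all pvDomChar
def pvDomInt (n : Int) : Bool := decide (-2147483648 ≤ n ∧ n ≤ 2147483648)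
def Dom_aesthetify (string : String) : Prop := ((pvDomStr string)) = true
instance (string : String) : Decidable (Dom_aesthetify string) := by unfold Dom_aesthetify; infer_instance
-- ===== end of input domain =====

-- B replaces A's per-character ord/branch/chr arithmetic by a translation table built once
-- (dict of ordinal -> ordinal, applied str.translate-style); objective: idiomatic, same cost.

set_option maxRecDepth 10000


-- ===== PORT A =====
-- for c in string: c = ord(c); if c in range(0x21,0x7f): c += 0xFF00-0x20 elif c == 32: c = 0x3000; yield chr(c)
def aesthetify (string : String) : List String :=
  string.toList.map (fun ch =>
    let c : Int := (ch.toNat : Int)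
    let c : Int := if 0x21 ≤ c ∧ c < 0x7f then c + (0xFF00 - 0x20)
                   else if c = 32 then 0x3000 else c
    String.mk [Char.ofNat c.toNat])

-- ===== PORT B =====
-- table = {0x20: 0x3000}; for o in range(0x21, 0x7f): table[o] = o + 0xFF00 - 0x20
def aesthTable : PySem.Dict Int Int :=
  (PySem.List.pyRange 0x21 0x7f 1).foldl
    (fun d o => d.insert o (o + 0xFF00 - 0x20))
    (PySem.Dict.insert PySem.Dict.empty 0x20 0x3000)

-- yield from string.translate(table): mapped ordinals replaced, unmapped characters pass through
def aesthetify_alt (string : String) : List String :=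
  string.toList.map (fun ch =>
    match aesthTable.get? ((ch.toNat : Int)) with
    | some v => String.mk [Char.ofNat v.toNat]
    | none => String.mk [ch])

-- ===== PRECONDITION & SPEC =====
def Spec_aesthetify (string : String) (out : List String) : Prop := out = aesthetify_alt string
instance (string : String) (out : List String) : Decidable (Spec_aesthetify string out) := by unfold Spec_aesthetify; infer_instance

-- ===== CLAIM (what is proved, stated in full; the proofs are below) =====
def Claim_equal_aesthetify : Prop := ∀ (string : String), Dom_aesthetify string → Spec_aesthetify string (aesthetify string)

-- ===== LEMMAS AND PROOFS =====

-- the table's lookup, characterised over the whole domain of codes that occur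
theorem aesthTable_get (k : Nat) (hk : k ≤ 126) :
    aesthTable.get? (k : Int) =
      if 33 ≤ k ∧ k < 127 then some ((k : Int) + (0xFF00 - 0x20))
      else if k = 32 then some 0x3000 else none := by
  interval_cases k <;> decide

theorem key_char (ch : Char) (h : pvDomChar ch = true) :
    (let c : Int := (ch.toNat : Int)
     let c : Int := if 0x21 ≤ c ∧ c < 0x7f then c + (0xFF00 - 0x20)
                    else if c = 32 then 0x3000 else c
     String.mk [Char.ofNat c.toNat]) =
    (match aesthTable.get? ((ch.toNat : Int)) with
     | some v => String.mk [Char.ofNat v.toNat]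
     | none => String.mk [ch]) := by
  simp only [pvDomChar, Bool.or_eq_true, Bool.and_eq_true, decide_eq_true_eq, beq_iff_eq] at h
  have hk : ch.toNat ≤ 126 := by omega
  rw [aesthTable_get ch.toNat hk]
  by_cases h1 : 33 ≤ ch.toNat ∧ ch.toNat < 127
  · have : (0x21 : Int) ≤ (ch.toNat : Int) ∧ (ch.toNat : Int) < 0x7f := by
      constructor <;> [exact_mod_cast h1.1; exact_mod_cast (by omega : (ch.toNat : Int) < 127)]
    simp only [if_pos h1, if_pos this]
  · simp only [if_neg h1]
    have h1' : ¬ ((0x21 : Int) ≤ (ch.toNat : Int) ∧ (ch.toNat : Int) < 0x7f) := by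
      intro ⟨ha, hb⟩; exact h1 ⟨by exact_mod_cast ha, by exact_mod_cast hb⟩
    simp only [if_neg h1']
    by_cases h2 : ch.toNat = 32
    · have : ((ch.toNat : Int) = 32) := by exact_mod_cast h2
      simp only [if_pos h2, if_pos this]
    · have h2' : ¬ ((ch.toNat : Int) = (32 : Int)) := by exact_mod_cast h2
      simp only [if_neg h2, if_neg h2']
      congr 1
      simp only [Int.toNat_natCast]
      exact congrArg (fun x => [x]) (Char.ofNat_toNat ch)

-- ===== VERDICT (by name: the statement is the Claim_ definition above) =====
theorem aesthetify_spec : Claim_equal_aesthetify := by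
  intro s hdom
  unfold Spec_aesthetify aesthetify aesthetify_alt
  apply List.map_congr_left
  intro ch hch
  have h : pvDomChar ch = true := by
    have := hdom
    unfold Dom_aesthetify pvDomStr at this
    exact List.all_eq_true.mp this ch hch
  exact key_char ch h
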